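-- pv_equiv track=rewrite | github.com/IlyaGerasimov/task5_bch | poly.py | poly_mul_2
-- ===== SOURCE A (Python) =====
-- def zero_poly(f):
--     while f and f[-1] == 0:
--         f.pop()
--     if not f:
--         return [0]
--     return f
--
-- def poly_mul_2(f, g):
--     m = len(f) - 1
--     h = len(g) - 1
--     q = [0] * (m + h + 1)
--     for i in range(h + 1):
--         for j in range(m + 1):
--             q[i + j] = q[i + j] ^ (g[i] & f[j])
--     return zero_poly(q)
-- ===== SOURCE B (Python) =====
-- def poly_mul_2(f, g):
--     # Compute each output coefficient directly as an XOR-accumulated dot product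
--     # over the anti-diagonal, instead of A's scatter updates into a result array.
--     if not f or not g:
--         return [0]
--     n = len(f) + len(g) - 1
--     q = []
--     for k in range(n):
--         lo = max(0, k - len(g) + 1)
--         hi = min(k, len(f) - 1)
--         c = 0
--         for j in range(lo, hi + 1):
--             c ^= f[j] & g[k - j]
--         q.append(c)
--     while q and q[-1] == 0:
--         q.pop()
--     return q if q else [0]
-- ===== Notes on version B (the rewrite author's own statement) =====
-- stated objective: alternative
-- what changed: B computes each output coefficient independently as an XOR-accumulated anti-diagonal dot product in a local accumulator (gather), instead of A's scatter of XOR read-modify-write updates into a preallocated result array via nested index writes.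
import Mathlib
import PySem

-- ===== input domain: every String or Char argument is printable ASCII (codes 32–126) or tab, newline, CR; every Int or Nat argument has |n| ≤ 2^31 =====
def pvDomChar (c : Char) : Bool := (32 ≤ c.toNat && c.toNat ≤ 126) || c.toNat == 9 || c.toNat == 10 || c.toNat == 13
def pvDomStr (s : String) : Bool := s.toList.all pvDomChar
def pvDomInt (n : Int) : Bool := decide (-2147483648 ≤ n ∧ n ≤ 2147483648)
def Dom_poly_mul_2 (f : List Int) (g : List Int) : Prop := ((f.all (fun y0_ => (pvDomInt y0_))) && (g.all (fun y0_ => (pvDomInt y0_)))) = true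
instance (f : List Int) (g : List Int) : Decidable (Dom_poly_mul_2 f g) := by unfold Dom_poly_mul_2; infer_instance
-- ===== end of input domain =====

-- B computes each output coefficient directly as an XOR dot product over the anti-diagonal
-- (one pass per coefficient) instead of A's scatter-XOR updates into a preallocated array;
-- objective: alternative structure, same exact values.

-- ===== PORT A =====
-- while f and f[-1] == 0: f.pop()  — popping trailing zeros = dropWhile (== 0) on the reverse
def zero_poly (f : List Int) : List Int :=
  let t := (List.dropWhile (fun x => x == 0) f.reverse).reverse
  if t.isEmpty then [0] else t

-- loop indices i, j are the nonnegative values of range(h+1) / range(m+1), so Nat ranges and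
-- List.getD / List.set at those (always in-range) indices are exact for Python's q[i+j] read/write.
def poly_mul_2 (f : List Int) (g : List Int) : List Int :=
  let m : Int := (f.length : Int) - 1
  let h : Int := (g.length : Int) - 1
  let q : List Int :=
    (List.range (h + 1).toNat).foldl (fun q i =>
      (List.range (m + 1).toNat).foldl (fun q j =>
        q.set (i + j) (PySem.Int.bxor (q.getD (i + j) 0)
          (PySem.Int.band (g.getD i 0) (f.getD j 0)))) q)
      (List.replicate (m + h + 1).toNat 0)
  zero_poly q

-- ===== PORT B =====
-- range(lo, hi+1) is ported as the shifted Nat range (lo + t, t < hi+1-lo); lo = max(0, k-len(g)+1)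
-- is the truncated Nat subtraction k+1-len(g); the append loop building q is the map over range(n).
def poly_mul_2_alt (f : List Int) (g : List Int) : List Int :=
  if f.isEmpty || g.isEmpty then [0]
  else
    let q := (List.range (f.length + g.length - 1)).map (fun k =>
      let lo := k + 1 - g.length
      let hi := min k (f.length - 1)
      (List.range (hi + 1 - lo)).foldl
        (fun c t => PySem.Int.bxor c
          (PySem.Int.band (f.getD (lo + t) 0) (g.getD (k - (lo + t)) 0))) 0)
    let r := (List.dropWhile (fun x => x == 0) q.reverse).reverse
    if r.isEmpty then [0] else r

-- ===== PRECONDITION & SPEC =====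
def Spec_poly_mul_2 (f : List Int) (g : List Int) (out : List Int) : Prop := out = poly_mul_2_alt f g
instance (f : List Int) (g : List Int) (out : List Int) : Decidable (Spec_poly_mul_2 f g out) := by unfold Spec_poly_mul_2; infer_instance

-- ===== CLAIM (what is proved, stated in full; the proofs are below) =====
def Claim_equal_poly_mul_2 : Prop := ∀ (f : List Int) (g : List Int), Dom_poly_mul_2 f g → Spec_poly_mul_2 f g (poly_mul_2 f g)

-- ===== LEMMAS AND PROOFS =====

theorem pv_bxor_eq_xor (a b : Int) : PySem.Int.bxor a b = Int.xor a b := by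
  rcases a with m | m <;> rcases b with n | n <;>
    simp [PySem.Int.bxor, Int.xor, Int.negSucc_eq] <;> omega

theorem pv_xor_lcomm (c x y : Int) : Int.xor (Int.xor c x) y = Int.xor (Int.xor c y) x := by
  rcases c with m | m <;> rcases x with n | n <;> rcases y with p | p <;>
    simp [Int.xor, Nat.xor_assoc, Nat.xor_comm n p]

theorem pv_bxor_lcomm (c x y : Int) :
    PySem.Int.bxor (PySem.Int.bxor c x) y = PySem.Int.bxor (PySem.Int.bxor c y) x := by
  simp [pv_bxor_eq_xor, pv_xor_lcomm]

theorem pv_getD_set (l : List Int) (i v k) :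
    (l.set i v).getD k 0 = if i = k ∧ k < l.length then v else l.getD k 0 := by
  simp only [List.getD_eq_getElem?_getD, List.getElem?_set]
  split_ifs with h1 h2 h3 h3 <;> simp_all

theorem pv_filter_range_interval (lo hi : Nat) : ∀ (n : Nat),
    (List.range n).filter (fun i => decide (lo ≤ i ∧ i < hi))
      = (List.range (min hi n - lo)).map (fun t => lo + t) := by
  intro n
  induction n with
  | zero => simp
  | succ n ih =>
      rw [List.range_succ, List.filter_append, ih]
      by_cases h : lo ≤ n ∧ n < hi
      · have h1 : min hi (n+1) - lo = (min hi n - lo) + 1 := by omega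
        have h2 : lo + (min hi n - lo) = n := by omega
        rw [h1, List.range_succ, List.map_append]
        simp [h, h2]
      · have h1 : min hi (n+1) - lo = min hi n - lo := by omega
        rw [h1]
        simp [h]

theorem pv_foldl_len {α : Type} (step : List Int → α → List Int)
    (hs : ∀ q x, (step q x).length = q.length) (l : List α) :
    ∀ q : List Int, (l.foldl step q).length = q.length := by
  induction l with
  | nil => intro q; rfl
  | cons y ys ih => intro q; simp only [List.foldl_cons]; rw [ih, hs]

theorem pv_inner_spec (f g : List Int) (i : Nat) : ∀ (n : Nat) (q : List Int) (k : Nat),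
    ((List.range n).foldl (fun q j =>
        q.set (i + j) (PySem.Int.bxor (q.getD (i + j) 0)
          (PySem.Int.band (g.getD i 0) (f.getD j 0)))) q).getD k 0
      = if i ≤ k ∧ k < i + n ∧ k < q.length then
          PySem.Int.bxor (q.getD k 0) (PySem.Int.band (g.getD i 0) (f.getD (k - i) 0))
        else q.getD k 0 := by
  intro n
  induction n with
  | zero => intro q k; simp; omega
  | succ n ih =>
      intro q k
      rw [List.range_succ, List.foldl_append, List.foldl_cons, List.foldl_nil, pv_getD_set]
      have hlen : ((List.range n).foldl (fun q j =>
          q.set (i + j) (PySem.Int.bxor (q.getD (i + j) 0)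
            (PySem.Int.band (g.getD i 0) (f.getD j 0)))) q).length = q.length :=
        pv_foldl_len _ (fun q x => List.length_set) _ q
      rw [hlen, ih, ih]
      by_cases hk : i + n = k
      · have hki : k - i = n := by omega
        have hno : ¬ (i ≤ k ∧ k < i + n ∧ k < q.length) := by omega
        by_cases hq : k < q.length
        · have h2 : i ≤ k ∧ k < i + (n+1) ∧ k < q.length := by omega
          simp [hk, hq, hki, h2]
        · have h2 : ¬ (i ≤ k ∧ k < i + (n+1) ∧ k < q.length) := by omega
          simp [hk, hq, hno]
      · by_cases hin : i ≤ k ∧ k < i + n ∧ k < q.length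
        · have h2 : i ≤ k ∧ k < i + (n+1) ∧ k < q.length := by omega
          simp [hk, hin, h2]
        · have h2 : ¬ (i ≤ k ∧ k < i + (n+1) ∧ k < q.length) := by omega
          simp [hk, hin, h2]

theorem pv_outer_spec (f g : List Int) : ∀ (n : Nat) (q : List Int) (k : Nat), k < q.length →
    ((List.range n).foldl (fun q i =>
        (List.range f.length).foldl (fun q j =>
          q.set (i + j) (PySem.Int.bxor (q.getD (i + j) 0)
            (PySem.Int.band (g.getD i 0) (f.getD j 0)))) q) q).getD k 0
      = (List.range n).foldl (fun c i =>
          if i ≤ k ∧ k < i + f.length then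
            PySem.Int.bxor c (PySem.Int.band (g.getD i 0) (f.getD (k - i) 0))
          else c) (q.getD k 0) := by
  intro n
  induction n with
  | zero => intro q k hk; rfl
  | succ n ih =>
      intro q k hk
      rw [List.range_succ, List.foldl_append, List.foldl_append, List.foldl_cons,
        List.foldl_cons, List.foldl_nil, List.foldl_nil, pv_inner_spec, ← ih q k hk]
      have hlen : ((List.range n).foldl (fun q i =>
          (List.range f.length).foldl (fun q j =>
            q.set (i + j) (PySem.Int.bxor (q.getD (i + j) 0)
              (PySem.Int.band (g.getD i 0) (f.getD j 0)))) q) q).length = q.length :=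
        pv_foldl_len _ (fun q i => pv_foldl_len _ (fun q j => List.length_set) _ q) _ q
      rw [hlen]
      by_cases h : n ≤ k ∧ k < n + f.length
      · have h2 : n ≤ k ∧ k < n + f.length ∧ k < q.length := by omega
        simp [h, h2]
      · have h2 : ¬ (n ≤ k ∧ k < n + f.length ∧ k < q.length) := by omega
        simp [h, h2]

theorem pv_foldl_bxor_pull' (l : List Int) : ∀ (c x : Int),
    l.foldl PySem.Int.bxor (PySem.Int.bxor c x)
      = PySem.Int.bxor (l.foldl PySem.Int.bxor c) x := by
  induction l with
  | nil => intro c x; rfl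
  | cons y ys ih => intro c x; simp only [List.foldl_cons]; rw [pv_bxor_lcomm, ih]

theorem pv_foldl_bxor_reverse' (l : List Int) (c : Int) :
    l.foldl PySem.Int.bxor c = l.reverse.foldl PySem.Int.bxor c := by
  induction l generalizing c with
  | nil => rfl
  | cons y ys ih =>
      simp only [List.foldl_cons, List.reverse_cons, List.foldl_append, List.foldl_cons,
        List.foldl_nil]
      rw [ih, pv_foldl_bxor_pull']

theorem pv_foldl_bxor_range_rev (v w : Nat → Int) (M : Nat)
    (h : ∀ t, t < M → v t = w (M - 1 - t)) :
    (List.range M).foldl (fun c t => PySem.Int.bxor c (v t)) 0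
      = (List.range M).foldl (fun c t => PySem.Int.bxor c (w t)) 0 := by
  have e1 := List.foldl_map (f := v) (g := PySem.Int.bxor) (l := List.range M) (init := (0 : Int))
  have e2 := List.foldl_map (f := w) (g := PySem.Int.bxor) (l := List.range M) (init := (0 : Int))
  rw [← e1, ← e2]
  have hrev : (List.range M).map v = ((List.range M).map w).reverse := by
    apply List.ext_getElem
    · simp
    · intro i h1 h2
      simp only [List.getElem_reverse, List.getElem_map, List.getElem_range, List.length_map,
        List.length_range]
      exact h i (by simpa using h1)
  rw [hrev, ← pv_foldl_bxor_reverse']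

theorem pv_coef_eq (f g : List Int) (k : Nat) (ha : 1 ≤ f.length) (hb : 1 ≤ g.length)
    (hk : k < f.length + g.length - 1) :
    (List.range g.length).foldl (fun c i =>
        if i ≤ k ∧ k < i + f.length then
          PySem.Int.bxor c (PySem.Int.band (g.getD i 0) (f.getD (k - i) 0))
        else c) 0
      = (List.range (min k (f.length - 1) + 1 - (k + 1 - g.length))).foldl
          (fun c t => PySem.Int.bxor c
            (PySem.Int.band (f.getD ((k + 1 - g.length) + t) 0)
              (g.getD (k - ((k + 1 - g.length) + t)) 0))) 0 := by
  have hfun : (fun (c : Int) (i : Nat) =>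
        if (decide (k + 1 - f.length ≤ i ∧ i < k + 1)) = true then
          PySem.Int.bxor c (PySem.Int.band (g.getD i 0) (f.getD (k - i) 0)) else c)
      = (fun (c : Int) (i : Nat) =>
        if i ≤ k ∧ k < i + f.length then
          PySem.Int.bxor c (PySem.Int.band (g.getD i 0) (f.getD (k - i) 0)) else c) := by
    funext c i
    simp only [decide_eq_true_eq]
    by_cases h : i ≤ k ∧ k < i + f.length
    · rw [if_pos (by omega : k + 1 - f.length ≤ i ∧ i < k + 1), if_pos h]
    · rw [if_neg (by omega : ¬ (k + 1 - f.length ≤ i ∧ i < k + 1)), if_neg h]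
  rw [← hfun, ← List.foldl_filter, pv_filter_range_interval, List.foldl_map]
  have hM : min (k + 1) g.length - (k + 1 - f.length)
      = min k (f.length - 1) + 1 - (k + 1 - g.length) := by omega
  rw [hM]
  apply pv_foldl_bxor_range_rev
  intro t ht
  have e2 : (k + 1 - g.length) + ((min k (f.length - 1) + 1 - (k + 1 - g.length)) - 1 - t)
      = k - ((k + 1 - f.length) + t) := by omega
  have e3 : k - (k - ((k + 1 - f.length) + t)) = (k + 1 - f.length) + t := by omega
  rw [e2, e3, PySem.Int.band_comm]

theorem pv_main (f g : List Int) : poly_mul_2 f g = poly_mul_2_alt f g := by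
  by_cases hf : f.length = 0
  · have hf' : f = [] := List.eq_nil_of_length_eq_zero hf
    subst hf'
    simp [poly_mul_2, poly_mul_2_alt, zero_poly, List.foldl_fixed]
  · by_cases hg : g.length = 0
    · have hg' : g = [] := List.eq_nil_of_length_eq_zero hg
      subst hg'
      simp [poly_mul_2, poly_mul_2_alt, zero_poly]
    · have ha : 1 ≤ f.length := by omega
      have hb : 1 ≤ g.length := by omega
      simp only [poly_mul_2, poly_mul_2_alt, zero_poly]
      rw [show ((f.length : Int) - 1 + 1).toNat = f.length from by omega,
          show ((g.length : Int) - 1 + 1).toNat = g.length from by omega,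
          show ((f.length : Int) - 1 + ((g.length : Int) - 1) + 1).toNat = f.length + g.length - 1 from by omega]
      have hguard : (f.isEmpty || g.isEmpty) = false := by
        simp only [Bool.or_eq_false_iff, List.isEmpty_eq_false_iff]
        exact ⟨fun h => hf (by simp [h]), fun h => hg (by simp [h])⟩
      rw [hguard]
      have hq : (List.range g.length).foldl (fun q i =>
          (List.range f.length).foldl (fun q j =>
            q.set (i + j) (PySem.Int.bxor (q.getD (i + j) 0)
              (PySem.Int.band (g.getD i 0) (f.getD j 0)))) q)
          (List.replicate (f.length + g.length - 1) 0)
          = (List.range (f.length + g.length - 1)).map (fun k =>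
              (List.range (min k (f.length - 1) + 1 - (k + 1 - g.length))).foldl
                (fun c t => PySem.Int.bxor c
                  (PySem.Int.band (f.getD ((k + 1 - g.length) + t) 0)
                    (g.getD (k - ((k + 1 - g.length) + t)) 0))) 0) := by
        have hlen : ((List.range g.length).foldl (fun q i =>
            (List.range f.length).foldl (fun q j =>
              q.set (i + j) (PySem.Int.bxor (q.getD (i + j) 0)
                (PySem.Int.band (g.getD i 0) (f.getD j 0)))) q)
            (List.replicate (f.length + g.length - 1) 0)).length
            = f.length + g.length - 1 := by
          rw [pv_foldl_len _ (fun q i => pv_foldl_len _ (fun q j => List.length_set) _ q)]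
          exact List.length_replicate
        apply List.ext_getElem
        · exact hlen.trans (by simp)
        · intro k h1 h2
          have hk : k < f.length + g.length - 1 := by rwa [hlen] at h1
          rw [← List.getD_eq_getElem _ 0 h1]
          rw [pv_outer_spec f g g.length _ k (by simp [List.length_replicate]; omega)]
          rw [List.getD_replicate 0 hk]
          rw [pv_coef_eq f g k ha hb hk]
          simp
      rw [hq]

      rfl

-- ===== VERDICT (by name: the statement is the Claim_ definition above) =====
theorem poly_mul_2_spec : Claim_equal_poly_mul_2 := by
  intro f g _
  exact pv_main f g
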